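-- pv_equiv track=rewrite | github.com/fiachra718/sutta_nlp | back.ne/promote_hand_picks.py | find_all_spans
-- ===== SOURCE A (Python) =====
-- import json, argparse, unicodedata
-- from typing import List, Tuple, Dict
--
-- def build_norm_map(s: str):
--     """Return (norm, idx_map) where norm is diacritic-stripped lowercase and
--     idx_map maps positions in norm -> positions in original string."""
--     norm_chars = []
--     idx_map = []
--     for i, ch in enumerate(s):
--         nfd = unicodedata.normalize("NFD", ch)
--         for sub in nfd:
--             if unicodedata.combining(sub):
--                 continue
--             norm_chars.append(sub.lower())
--             idx_map.append(i)
--     norm = "".join(norm_chars)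
--     return norm, idx_map
--
-- def find_all_spans(text: str, term: str) -> List[Tuple[int,int]]:
--     """Find all occurrences of term in text, case- & diacritic-insensitive.
--     Returns spans in ORIGINAL text indices."""
--     if not term:
--         return []
--     norm_text, idx_map = build_norm_map(text)
--     norm_term, _ = build_norm_map(term)
--     if not norm_term:
--         return []
--     spans = []
--     start = 0
--     while True:
--         pos = norm_text.find(norm_term, start)
--         if pos == -1:
--             break
--         orig_start = idx_map[pos]
--         last_norm_idx = pos + len(norm_term) - 1
--         orig_end = idx_map[last_norm_idx] + 1  # exclusive
--         spans.append((orig_start, orig_end))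
--         start = pos + 1
--     return spans
-- ===== SOURCE B (Python) =====
-- import unicodedata
--
-- def build_norm_map(s):
--     """Return (norm, idx_map): diacritic-stripped lowercase text and a map
--     from positions in norm back to positions in the original string."""
--     norm_chars = []
--     idx_map = []
--     for i, ch in enumerate(s):
--         for sub in unicodedata.normalize("NFD", ch):
--             if unicodedata.combining(sub):
--                 continue
--             norm_chars.append(sub.lower())
--             idx_map.append(i)
--     return "".join(norm_chars), idx_map
--
-- def find_all_spans(text, term):
--     """Single comprehension over every candidate start position (naturally
--     overlapping), instead of A's while/str.find loop with a moving cursor."""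
--     if not term:
--         return []
--     norm_text, idx_map = build_norm_map(text)
--     norm_term, _ = build_norm_map(term)
--     if not norm_term:
--         return []
--     m = len(norm_term)
--     return [(idx_map[p], idx_map[p + m - 1] + 1)
--             for p in range(len(norm_text) - m + 1)
--             if norm_text[p:p + m] == norm_term]
-- ===== Notes on version B (the rewrite author's own statement) =====
-- stated objective: alternative
-- what changed: B replaces A's while-loop with a moving cursor and repeated str.find calls by a single comprehension that tests every candidate start position of the normalized text for a match, keeping the normalization helper unchanged.
import Mathlib
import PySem

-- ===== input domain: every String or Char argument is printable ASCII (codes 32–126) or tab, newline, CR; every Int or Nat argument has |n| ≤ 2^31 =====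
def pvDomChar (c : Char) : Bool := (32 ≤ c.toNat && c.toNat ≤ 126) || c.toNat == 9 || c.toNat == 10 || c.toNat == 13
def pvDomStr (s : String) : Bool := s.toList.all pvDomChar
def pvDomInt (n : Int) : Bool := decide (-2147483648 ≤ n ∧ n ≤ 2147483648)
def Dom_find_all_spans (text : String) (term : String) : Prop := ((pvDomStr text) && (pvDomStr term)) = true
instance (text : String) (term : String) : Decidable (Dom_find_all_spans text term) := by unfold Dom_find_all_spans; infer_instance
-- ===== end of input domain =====

-- B replaces A's while/str.find cursor loop by a single comprehension over every
-- candidate start position of the normalized text (objective: alternative, same cost).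


-- ===== PORT A =====
-- build_norm_map, shared helper of both Pythons. Exact on the ASCII domain: for an
-- ASCII character unicodedata.normalize("NFD", ch) is ch itself and combining(ch) = 0,
-- so each character contributes exactly its lowercase form and its own index.
def pvNormMap (s : List Char) : List Char × List Int :=
  (PySem.List.enumerate s).foldl
    (fun acc p => (acc.1 ++ [PySem.Chars.lowerChar p.2], acc.2 ++ [p.1])) ([], [])

-- A's 'while True' find loop; fuel (length+1 on entry) only makes it total, the
-- loop always breaks before the fuel runs out.
def pvLoopA (nt ntm : List Char) (idx : List Int) : Nat → Nat → List (Int × Int)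
  | 0, _ => []
  | fuel+1, start =>
    let pos := PySem.Chars.findFrom nt ntm (start : Int) none
    if pos = -1 then []
    else
      (PySem.List.pyGetD idx pos 0,
       PySem.List.pyGetD idx (pos + (ntm.length : Int) - 1) 0 + 1)
      :: pvLoopA nt ntm idx fuel (pos.toNat + 1)

def find_all_spans (text : String) (term : String) : List (Int × Int) :=
  if term.toList = [] then []
  else
    let tm := pvNormMap text.toList
    let qm := pvNormMap term.toList
    if qm.1 = [] then []
    else pvLoopA tm.1 qm.1 tm.2 (tm.1.length + 1) 0

-- ===== PORT B =====
def find_all_spans_alt (text : String) (term : String) : List (Int × Int) :=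
  if term.toList = [] then []
  else
    let tm := pvNormMap text.toList
    let qm := pvNormMap term.toList
    if qm.1 = [] then []
    else
      let m : Int := qm.1.length
      ((PySem.List.pyRange 0 ((tm.1.length : Int) - m + 1) 1).filter
        (fun p => PySem.List.slice tm.1 (some p) (some (p + m)) == qm.1)).map
        (fun p => (PySem.List.pyGetD tm.2 p 0, PySem.List.pyGetD tm.2 (p + m - 1) 0 + 1))

-- ===== PRECONDITION & SPEC =====
def Spec_find_all_spans (text : String) (term : String) (out : List (Int × Int)) : Prop := out = find_all_spans_alt text term
instance (text : String) (term : String) (out : List (Int × Int)) : Decidable (Spec_find_all_spans text term out) := by unfold Spec_find_all_spans; infer_instance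

-- ===== CLAIM (what is proved, stated in full; the proofs are below) =====
def Claim_equal_find_all_spans : Prop := ∀ (text : String) (term : String), Dom_find_all_spans text term → Spec_find_all_spans text term (find_all_spans text term)

-- ===== LEMMAS AND PROOFS =====

theorem prefix_drop_infix {a b : List Char} (k : Nat) (h : a <+: b.drop k) : a <:+: b := by
  obtain ⟨r, hr⟩ := h
  exact ⟨b.take k, r, by rw [List.append_assoc, hr, List.take_append_drop]⟩

-- splitting a filtered range at the first hit ≥ s
theorem filter_range_split (K p s : Nat) (q : Nat → Bool) (hpK : p < K) (hsp : s ≤ p)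
    (hq : q p = true) (hmin : ∀ i, s ≤ i → i < p → q i = false) :
    (List.range K).filter (fun i => decide (s ≤ i) && q i)
      = p :: (List.range K).filter (fun i => decide (p + 1 ≤ i) && q i) := by
  have hK : K = (p + 1) + (K - (p + 1)) := by omega
  rw [hK, List.range_add, List.range_succ]
  simp only [List.filter_append]
  have h1 : (List.range p).filter (fun i => decide (s ≤ i) && q i) = [] := by
    rw [List.filter_eq_nil_iff]
    intro a ha
    simp only [List.mem_range] at ha
    by_cases hsa : s ≤ a
    · simp [hmin a hsa ha]
    · simp [hsa]
  have h2 : (List.range p).filter (fun i => decide (p + 1 ≤ i) && q i) = [] := by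
    rw [List.filter_eq_nil_iff]
    intro a ha
    simp only [List.mem_range] at ha
    simp [show ¬ (p + 1 ≤ a) by omega]
  have h4 : ((List.range (K - (p+1))).map (fun x => (p+1) + x)).filter
        (fun i => decide (s ≤ i) && q i)
      = ((List.range (K - (p+1))).map (fun x => (p+1) + x)).filter
        (fun i => decide (p + 1 ≤ i) && q i) := by
    apply List.filter_congr
    intro a ha
    simp only [List.mem_map, List.mem_range] at ha
    obtain ⟨x, _, rfl⟩ := ha
    simp [show s ≤ p + 1 + x by omega, show p + 1 ≤ p + 1 + x by omega]
  have h5 : List.filter (fun i => decide (s ≤ i) && q i) [p] = [p] := by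
    simp [hq, hsp]
  have h6 : List.filter (fun i => decide (p + 1 ≤ i) && q i) [p] = [] := by
    simp
  rw [h1, h2, h4, h5, h6]
  simp

-- A's loop returns exactly the matching positions ≥ start, in increasing order
theorem pvLoopA_eq (nt ntm : List Char) (idx : List Int) (hm : ntm ≠ []) :
    ∀ (fuel start : Nat), nt.length + 1 ≤ start + fuel → start ≤ nt.length →
    pvLoopA nt ntm idx fuel start
      = (((List.range (nt.length + 1 - ntm.length)).filter
            (fun (p : Nat) => decide (start ≤ p) && decide (ntm <+: nt.drop p))).map
          (fun (p : Nat) => ((PySem.List.pyGetD idx (p : Int) 0 : Int),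
                     PySem.List.pyGetD idx ((p : Int) + (ntm.length : Int) - 1) 0 + 1))) := by
  intro fuel
  induction fuel with
  | zero => intro start h1 h2; omega
  | succ fuel ih =>
    intro start h1 h2
    unfold pvLoopA
    by_cases hneg : PySem.Chars.findFrom nt ntm (start : Int) none = -1
    · rw [if_pos hneg]
      have hno : ¬ ntm <:+: nt.drop start :=
        (PySem.Chars.findFrom_natCast_eq_neg_one_iff nt ntm start h2).mp hneg
      symm
      rw [List.map_eq_nil_iff, List.filter_eq_nil_iff]
      intro a _ hfa
      simp only [Bool.and_eq_true, decide_eq_true_eq] at hfa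
      obtain ⟨hsa, hpre⟩ := hfa
      exact absurd (prefix_drop_infix (b := nt.drop start) (a := ntm) (a - start)
        (by rw [List.drop_drop, Nat.add_sub_cancel' hsa]; exact hpre)) hno
    · rw [if_neg hneg]
      obtain ⟨hge, hpre, hmin⟩ := PySem.Chars.findFrom_natCast_spec nt ntm start h2 hneg
      set pos := PySem.Chars.findFrom nt ntm (start : Int) none with hpos
      have hpos0 : 0 ≤ pos := le_trans (by exact_mod_cast Int.natCast_nonneg start) hge
      set p := pos.toNat with hp
      have hcast : (p : Int) = pos := Int.toNat_of_nonneg hpos0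
      have hsp : start ≤ p := by omega
      have hm1 : 1 ≤ ntm.length := List.length_pos_iff.mpr hm
      have hpn : p + ntm.length ≤ nt.length := by
        by_cases hpn' : p ≤ nt.length
        · have := hpre.length_le
          simp only [List.length_drop] at this
          omega
        · exfalso
          have : nt.drop p = [] := List.drop_eq_nil_of_le (by omega)
          rw [this] at hpre
          exact hm (List.prefix_nil.mp hpre)
      rw [filter_range_split (nt.length + 1 - ntm.length) p start
            (fun i => decide (ntm <+: nt.drop i)) (by omega) hsp
            (by simp [hpre])
            (fun i hi1 hi2 => by simp [hmin i hi1 hi2])]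
      rw [List.map_cons]
      congr 1
      · rw [hcast]
      · exact ih (p + 1) (by omega) (by omega)

-- B's filtered range, rewritten over Nat positions with the prefix condition
theorem alt_body_eq (nt ntm : List Char) (idx : List Int) :
    ((PySem.List.pyRange 0 ((nt.length : Int) - (ntm.length : Int) + 1) 1).filter
        (fun p => PySem.List.slice nt (some p) (some (p + (ntm.length : Int))) == ntm)).map
        (fun p => ((PySem.List.pyGetD idx p 0 : Int),
                   PySem.List.pyGetD idx (p + (ntm.length : Int) - 1) 0 + 1))
      = (((List.range (nt.length + 1 - ntm.length)).filter
            (fun (p : Nat) => decide ((0:Nat) ≤ p) && decide (ntm <+: nt.drop p))).map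
          (fun (p : Nat) => ((PySem.List.pyGetD idx (p : Int) 0 : Int),
                     PySem.List.pyGetD idx ((p : Int) + (ntm.length : Int) - 1) 0 + 1))) := by
  by_cases hmn : ntm.length ≤ nt.length
  · have hstop : (nt.length : Int) - (ntm.length : Int) + 1
        = ((nt.length + 1 - ntm.length : Nat) : Int) := by omega
    rw [hstop, PySem.List.pyRange_zero_natCast, List.filter_map, List.map_map]
    have hfil : (List.range (nt.length + 1 - ntm.length)).filter
          ((fun p => PySem.List.slice nt (some p) (some (p + (ntm.length : Int))) == ntm)
            ∘ (fun (k : Nat) => (k : Int)))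
        = (List.range (nt.length + 1 - ntm.length)).filter
          (fun (p : Nat) => decide ((0:Nat) ≤ p) && decide (ntm <+: nt.drop p)) := by
      apply List.filter_congr
      intro a _
      simp only [Function.comp_apply]
      have hsum : ((a : Int) + (ntm.length : Int)) = ((a + ntm.length : Nat) : Int) := by
        push_cast; ring
      rw [hsum, PySem.List.slice_natCast, Nat.add_sub_cancel_left]
      simp only [Nat.zero_le, decide_true, Bool.true_and]
      rw [Bool.eq_iff_iff]
      simp only [beq_iff_eq, decide_eq_true_eq]
      rw [List.prefix_iff_eq_take]
      exact eq_comm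
    rw [hfil]
    rfl
  · have h1 : PySem.List.pyRange 0 ((nt.length : Int) - (ntm.length : Int) + 1) 1 = [] := by
      rw [List.eq_nil_iff_forall_not_mem]
      intro x hx
      rw [PySem.List.mem_pyRange_one] at hx
      omega
    have h2 : nt.length + 1 - ntm.length = 0 := by omega
    rw [h1, h2]
    simp

-- ===== VERDICT (by name: the statement is the Claim_ definition above) =====
theorem find_all_spans_spec : Claim_equal_find_all_spans := by
  intro text term _
  unfold Spec_find_all_spans find_all_spans find_all_spans_alt
  by_cases h0 : term.toList = []
  · simp [h0]
  · rw [if_neg h0, if_neg h0]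
    by_cases h1 : (pvNormMap term.toList).1 = []
    · rw [if_pos h1, if_pos h1]
    · rw [if_neg h1, if_neg h1]
      rw [pvLoopA_eq (pvNormMap text.toList).1 (pvNormMap term.toList).1
            (pvNormMap text.toList).2 h1 ((pvNormMap text.toList).1.length + 1) 0
            (by omega) (by omega)]
      rw [alt_body_eq (pvNormMap text.toList).1 (pvNormMap term.toList).1
            (pvNormMap text.toList).2]
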